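-- pv_equiv track=rewrite | github.com/jingzzang/Python_basic | test2_2.py | sol10
-- ===== SOURCE A (Python) =====
-- cri=[1000000,600000,400000,200000]
--
-- gift=[50000, 30000, 20000, 10000]
--
-- def sol10(p):
--     sum=0
--     for i in p:
--         for j in range(len(cri)):
--             if i>=cri[j]:
--                 sum+=gift[j]
--                 break
--     return sum
-- ===== SOURCE B (Python) =====
-- cri=[1000000,600000,400000,200000]
--
-- gift=[50000, 30000, 20000, 10000]
--
-- def sol10(p):
--     # Count how many purchases reach each threshold; each purchase that
--     # reaches threshold j earns the marginal gift (gift[j] - gift[j+1])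
--     # on top of the lower tiers, so the total is a weighted sum of counts.
--     c0 = sum(1 for x in p if x >= 1000000)
--     c1 = sum(1 for x in p if x >= 600000)
--     c2 = sum(1 for x in p if x >= 400000)
--     c3 = sum(1 for x in p if x >= 200000)
--     return 20000 * c0 + 10000 * (c1 + c2 + c3)
-- ===== Notes on version B (the rewrite author's own statement) =====
-- stated objective: alternative
-- what changed: Replaces the per-purchase first-match scan of the threshold list (with break) by four threshold counts over the whole list, combined with marginal-gift weights (telescoped tier values), so no inner scan or break exists.
import Mathlib
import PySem

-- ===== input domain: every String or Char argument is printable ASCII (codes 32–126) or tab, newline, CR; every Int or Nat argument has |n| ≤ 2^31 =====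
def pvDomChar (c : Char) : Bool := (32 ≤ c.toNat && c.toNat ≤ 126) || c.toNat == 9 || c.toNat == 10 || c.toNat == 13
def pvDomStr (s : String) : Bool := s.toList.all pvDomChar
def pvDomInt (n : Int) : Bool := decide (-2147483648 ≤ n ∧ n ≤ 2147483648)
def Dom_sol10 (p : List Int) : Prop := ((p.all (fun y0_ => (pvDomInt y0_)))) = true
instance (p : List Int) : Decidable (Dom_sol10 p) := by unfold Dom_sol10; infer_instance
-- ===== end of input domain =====

-- B replaces A's per-purchase first-match scan of the tier list (with break)
-- by four whole-list threshold counts combined with marginal-gift weights (alternative decomposition, same cost).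


-- ===== PORT A =====
def criL : List Int := [1000000, 600000, 400000, 200000]
def giftL : List Int := [50000, 30000, 20000, 10000]

-- inner 'for j in range(len(cri)): if i>=cri[j]: sum+=gift[j]; break'
-- as first-match recursion over the paired tier lists (break = stop at first hit)
def sol10Inner (i : Int) : List Int → List Int → Int
  | c :: cs, g :: gs => if i ≥ c then g else sol10Inner i cs gs
  | _, _ => 0

def sol10 (p : List Int) : Int :=
  p.foldl (fun s i => s + sol10Inner i criL giftL) 0

-- ===== PORT B =====
def sol10_alt (p : List Int) : Int :=
  let c0 : Int := p.countP (fun x => x ≥ 1000000)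
  let c1 : Int := p.countP (fun x => x ≥ 600000)
  let c2 : Int := p.countP (fun x => x ≥ 400000)
  let c3 : Int := p.countP (fun x => x ≥ 200000)
  20000 * c0 + 10000 * (c1 + c2 + c3)

-- ===== PRECONDITION & SPEC =====
def Spec_sol10 (p : List Int) (out : Int) : Prop := out = sol10_alt p
instance (p : List Int) (out : Int) : Decidable (Spec_sol10 p out) := by unfold Spec_sol10; infer_instance

-- ===== CLAIM (what is proved, stated in full; the proofs are below) =====
def Claim_equal_sol10 : Prop := ∀ (p : List Int), Dom_sol10 p → Spec_sol10 p (sol10 p)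

-- ===== LEMMAS AND PROOFS =====

theorem sol10_foldl_shift (p : List Int) (s : Int) :
    p.foldl (fun s i => s + sol10Inner i criL giftL) s
      = s + p.foldl (fun s i => s + sol10Inner i criL giftL) 0 := by
  induction p generalizing s with
  | nil => simp
  | cons x xs ih =>
    simp only [List.foldl_cons]
    rw [ih, ih (0 + sol10Inner x criL giftL)]
    ring

theorem sol10_inner_val (x : Int) :
    sol10Inner x criL giftL
      = (if x ≥ 1000000 then (20000:Int) else 0) + (if x ≥ 600000 then (10000:Int) else 0)
        + (if x ≥ 400000 then (10000:Int) else 0) + (if x ≥ 200000 then (10000:Int) else 0) := by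
  simp only [criL, giftL, sol10Inner]
  split_ifs <;> omega

theorem sol10_alt_cons (x : Int) (xs : List Int) :
    sol10_alt (x :: xs)
      = ((if x ≥ 1000000 then (20000:Int) else 0) + (if x ≥ 600000 then (10000:Int) else 0)
         + (if x ≥ 400000 then (10000:Int) else 0) + (if x ≥ 200000 then (10000:Int) else 0))
        + sol10_alt xs := by
  simp only [sol10_alt, List.countP_cons]
  split_ifs with h1 h2 h3 h4 <;> simp_all <;> omega

theorem sol10_eq_alt (p : List Int) : sol10 p = sol10_alt p := by
  induction p with
  | nil => rfl
  | cons x xs ih =>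
    simp only [sol10, List.foldl_cons, zero_add] at *
    rw [sol10_foldl_shift xs (sol10Inner x criL giftL), ih, sol10_inner_val]
    rw [sol10_alt_cons]

-- ===== VERDICT (by name: the statement is the Claim_ definition above) =====
theorem sol10_spec : Claim_equal_sol10 := by
  intro p _
  unfold Spec_sol10
  exact sol10_eq_alt p
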